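-- pv_equiv track=rewrite | github.com/Lior-Nis/base44_analysis | demo_analysis.py | classify_app_types
-- ===== SOURCE A (Python) =====
-- def classify_app_types(scored_apps):
--     """Classify apps into taxonomic categories"""
--     taxonomy = {
--         'Business Automation': [],
--         'Customer Tools': [],
--         'Data Management': [],
--         'Personal Projects': [],
--         'SaaS Alternatives': []
--     }
--
--     for app in scored_apps:
--         description = app.get('description', '').lower()
--         category = app.get('category', '')
--
--         # Classification logic
--         if any(word in description for word in ['replace', 'alternative', 'instead of']):
--             taxonomy['SaaS Alternatives'].append(app)
--         elif category == 'Internal Tool' or any(word in description for word in ['admin', 'management', 'dashboard']):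
--             taxonomy['Business Automation'].append(app)
--         elif category == 'Customer Portal' or any(word in description for word in ['customer', 'client', 'user']):
--             taxonomy['Customer Tools'].append(app)
--         elif any(word in description for word in ['data', 'database', 'analytics']):
--             taxonomy['Data Management'].append(app)
--         else:
--             taxonomy['Personal Projects'].append(app)
--
--     return taxonomy
-- ===== SOURCE B (Python) =====
-- def classify_app_types(scored_apps):
--     """Classify apps into taxonomic categories (pure label function + per-category filters)"""
--     def label(app):
--         description = app.get('description', '').lower()
--         category = app.get('category', '')
--         if any(w in description for w in ('replace', 'alternative', 'instead of')):
--             return 'SaaS Alternatives'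
--         if category == 'Internal Tool' or any(w in description for w in ('admin', 'management', 'dashboard')):
--             return 'Business Automation'
--         if category == 'Customer Portal' or any(w in description for w in ('customer', 'client', 'user')):
--             return 'Customer Tools'
--         if any(w in description for w in ('data', 'database', 'analytics')):
--             return 'Data Management'
--         return 'Personal Projects'
--
--     names = ['Business Automation', 'Customer Tools', 'Data Management',
--              'Personal Projects', 'SaaS Alternatives']
--     return {name: [app for app in scored_apps if label(app) == name] for name in names}
-- ===== Notes on version B (the rewrite author's own statement) =====
-- stated objective: idiomatic
-- what changed: Replaces the single mutating pass with an if/elif chain appending into a dict by a pure label(app) function plus a dict comprehension that builds each category as a filter of scored_apps (five independent passes, no mutation).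
import Mathlib
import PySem

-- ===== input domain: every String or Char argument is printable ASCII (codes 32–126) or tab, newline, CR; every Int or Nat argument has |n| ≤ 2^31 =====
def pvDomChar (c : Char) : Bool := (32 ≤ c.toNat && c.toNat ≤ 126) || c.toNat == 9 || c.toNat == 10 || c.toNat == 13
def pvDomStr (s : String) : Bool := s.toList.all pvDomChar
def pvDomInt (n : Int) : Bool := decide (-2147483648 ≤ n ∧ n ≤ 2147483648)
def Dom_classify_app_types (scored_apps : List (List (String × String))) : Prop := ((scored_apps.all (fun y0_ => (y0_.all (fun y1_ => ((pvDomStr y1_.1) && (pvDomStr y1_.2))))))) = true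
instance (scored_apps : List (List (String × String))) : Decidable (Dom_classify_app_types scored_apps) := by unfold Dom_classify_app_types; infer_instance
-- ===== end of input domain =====

-- B replaces A's single mutating pass (if/elif chain appending into a dict) by a pure label
-- function plus per-category filters; objective: idiomatic, same O(n) cost.

-- ===== PORT A =====
-- the initial taxonomy dict literal, in its written (insertion) order
def pvInitTaxonomy : PySem.Dict String (List (List (String × String))) :=
  (((((PySem.Dict.empty).insert "Business Automation" []).insert "Customer Tools" []).insert
    "Data Management" []).insert "Personal Projects" []).insert "SaaS Alternatives" []

def classify_app_types (scored_apps : List (List (String × String))) : List (String × List (List (String × String))) :=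
  let taxonomy := pvInitTaxonomy
  let taxonomy := scored_apps.foldl (fun tx app =>
    let description := PySem.Str.lower ((PySem.Dict.mk app).getD "description" "")
    let category := (PySem.Dict.mk app).getD "category" ""
    if ["replace", "alternative", "instead of"].any (fun w => PySem.Str.isIn w description) then
      tx.modify "SaaS Alternatives" [] (fun l => l ++ [app])
    else if category == "Internal Tool" || ["admin", "management", "dashboard"].any (fun w => PySem.Str.isIn w description) then
      tx.modify "Business Automation" [] (fun l => l ++ [app])
    else if category == "Customer Portal" || ["customer", "client", "user"].any (fun w => PySem.Str.isIn w description) then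
      tx.modify "Customer Tools" [] (fun l => l ++ [app])
    else if ["data", "database", "analytics"].any (fun w => PySem.Str.isIn w description) then
      tx.modify "Data Management" [] (fun l => l ++ [app])
    else
      tx.modify "Personal Projects" [] (fun l => l ++ [app])) taxonomy
  taxonomy.items

-- ===== PORT B =====
def pvLabel (app : List (String × String)) : String :=
  let description := PySem.Str.lower ((PySem.Dict.mk app).getD "description" "")
  let category := (PySem.Dict.mk app).getD "category" ""
  if ["replace", "alternative", "instead of"].any (fun w => PySem.Str.isIn w description) then
    "SaaS Alternatives"
  else if category == "Internal Tool" || ["admin", "management", "dashboard"].any (fun w => PySem.Str.isIn w description) then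
    "Business Automation"
  else if category == "Customer Portal" || ["customer", "client", "user"].any (fun w => PySem.Str.isIn w description) then
    "Customer Tools"
  else if ["data", "database", "analytics"].any (fun w => PySem.Str.isIn w description) then
    "Data Management"
  else
    "Personal Projects"

def pvNames : List String :=
  ["Business Automation", "Customer Tools", "Data Management", "Personal Projects", "SaaS Alternatives"]

def classify_app_types_alt (scored_apps : List (List (String × String))) : List (String × List (List (String × String))) :=
  pvNames.map (fun name => (name, scored_apps.filter (fun app => pvLabel app == name)))

-- ===== PRECONDITION & SPEC =====
def Spec_classify_app_types (scored_apps : List (List (String × String))) (out : List (String × List (List (String × String)))) : Prop := out = classify_app_types_alt scored_apps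
instance (scored_apps : List (List (String × String))) (out : List (String × List (List (String × String)))) : Decidable (Spec_classify_app_types scored_apps out) := by unfold Spec_classify_app_types; infer_instance

-- ===== CLAIM (what is proved, stated in full; the proofs are below) =====
def Claim_equal_classify_app_types : Prop := ∀ (scored_apps : List (List (String × String))), Dom_classify_app_types scored_apps → Spec_classify_app_types scored_apps (classify_app_types scored_apps)

-- ===== LEMMAS AND PROOFS =====

-- A's loop body appends the app to exactly the category pvLabel selects
lemma stepA_eq_modify_label (tx : PySem.Dict String (List (List (String × String)))) (app : List (String × String)) :
    (let description := PySem.Str.lower ((PySem.Dict.mk app).getD "description" "")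
     let category := (PySem.Dict.mk app).getD "category" ""
     if ["replace", "alternative", "instead of"].any (fun w => PySem.Str.isIn w description) then
       tx.modify "SaaS Alternatives" [] (fun l => l ++ [app])
     else if category == "Internal Tool" || ["admin", "management", "dashboard"].any (fun w => PySem.Str.isIn w description) then
       tx.modify "Business Automation" [] (fun l => l ++ [app])
     else if category == "Customer Portal" || ["customer", "client", "user"].any (fun w => PySem.Str.isIn w description) then
       tx.modify "Customer Tools" [] (fun l => l ++ [app])
     else if ["data", "database", "analytics"].any (fun w => PySem.Str.isIn w description) then
       tx.modify "Data Management" [] (fun l => l ++ [app])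
     else
       tx.modify "Personal Projects" [] (fun l => l ++ [app])) =
    tx.modify (pvLabel app) [] (fun l => l ++ [app]) := by
  unfold pvLabel
  dsimp only
  split_ifs <;> rfl

lemma label_mem_names (app : List (String × String)) : pvLabel app ∈ pvNames := by
  unfold pvLabel pvNames
  dsimp only
  split_ifs <;> simp

-- final dict of A's loop, as a foldl over (label, app) pairs
lemma loopA_eq_pairs (s : List (List (String × String))) :
    s.foldl (fun tx app => tx.modify (pvLabel app) [] (fun l => l ++ [app])) pvInitTaxonomy =
    (s.map (fun a => (pvLabel a, a))).foldl (fun d p => d.modify p.1 [] (fun l => l ++ [p.2])) pvInitTaxonomy := by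
  rw [List.foldl_map]

lemma keys_init : pvInitTaxonomy.keys = pvNames := by decide

lemma keys_loopA (s : List (List (String × String))) :
    ((s.map (fun a => (pvLabel a, a))).foldl (fun d p => d.modify p.1 [] (fun l => l ++ [p.2])) pvInitTaxonomy).keys = pvNames := by
  rw [PySem.Dict.keys_foldl_modify_key (key := Prod.fst), keys_init, List.map_map,
    PySem.Set.update_eq_append_filter]
  have h : ((PySem.Set.ofList (s.map (Prod.fst ∘ fun a => (pvLabel a, a)))).filter
      (fun y => !(PySem.Set.contains pvNames y))) = [] := by
    rw [List.filter_eq_nil_iff]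
    intro y hy
    have hy' : y ∈ s.map (Prod.fst ∘ fun a => (pvLabel a, a)) := (PySem.List.mem_dedup _ y).mp hy
    obtain ⟨a, _, rfl⟩ := List.mem_map.mp hy'
    simpa using label_mem_names a
  rw [h, List.append_nil]

lemma getD_init (k : String) (hk : k ∈ pvNames) : pvInitTaxonomy.getD k [] = [] := by
  fin_cases hk <;> decide

lemma getD_loopA (s : List (List (String × String))) (k : String) (hk : k ∈ pvNames) :
    ((s.map (fun a => (pvLabel a, a))).foldl (fun d p => d.modify p.1 [] (fun l => l ++ [p.2])) pvInitTaxonomy).getD k [] =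
    s.filter (fun app => pvLabel app == k) := by
  rw [PySem.Dict.getD_foldl_modify_append, getD_init k hk, List.nil_append,
    List.filter_map, List.map_map]
  simp [Function.comp_def]

-- ===== VERDICT (by name: the statement is the Claim_ definition above) =====
theorem classify_app_types_spec : Claim_equal_classify_app_types := by
  intro s _
  unfold Spec_classify_app_types classify_app_types classify_app_types_alt
  simp only [stepA_eq_modify_label]
  rw [loopA_eq_pairs]
  rw [PySem.Dict.items_eq_map_keys _ (by rw [keys_loopA]; decide) []]
  rw [keys_loopA]
  refine List.map_congr_left ?_
  intro k hk
  rw [getD_loopA s k hk]
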